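-- pv_equiv track=rewrite | github.com/elilourens/prophit | test-backend/analysis/summary.py | _match_transport
-- ===== SOURCE A (Python) =====
-- def _match_transport(description: str, category: str) -> bool:
--     d = (description or "").upper()
--     c = (category or "").upper()
--     if c in ("TRANSPORT", "FUEL", "PARKING"):
--         return True
--     for k in ("TFL", "UBER", "BUS", "TRAIN", "PETROL", "SHELL", "BP ", "PARKING", "TUBE"):
--         if k in d:
--             return True
--     return False
-- ===== SOURCE B (Python) =====
-- _CATS = ("TRANSPORT", "FUEL", "PARKING")
-- _KEYWORDS = ("TFL", "UBER", "BUS", "TRAIN", "PETROL", "SHELL", "BP ", "PARKING", "TUBE")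
--
--
-- def _build_trie():
--     # prefix trie of all keywords; "" key marks "a keyword ends here"
--     root = {}
--     for k in _KEYWORDS:
--         node = root
--         for ch in k:
--             node = node.setdefault(ch, {})
--         node[""] = True
--     return root
--
--
-- _TRIE = _build_trie()
--
--
-- def _hit(node, d, j):
--     # True iff some keyword (a terminal in the trie under `node`) is a prefix of d[j:]
--     if "" in node:
--         return True
--     if j >= len(d):
--         return False
--     nxt = node.get(d[j])
--     return nxt is not None and _hit(nxt, d, j + 1)
--
--
-- def _match_transport(description: str, category: str) -> bool:
--     if (category or "").upper() in _CATS: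
--         return True
--     d = (description or "").upper()
--     for i in range(len(d)):
--         if _hit(_TRIE, d, i):
--             return True
--     return False
-- ===== Notes on version B (the rewrite author's own statement) =====
-- stated objective: alternative
-- what changed: A runs nine independent 'k in d' substring searches; B builds a prefix trie of the nine keywords once and, for each start position, walks the description down the trie, testing all keywords simultaneously in one descent per position.
import Mathlib
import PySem

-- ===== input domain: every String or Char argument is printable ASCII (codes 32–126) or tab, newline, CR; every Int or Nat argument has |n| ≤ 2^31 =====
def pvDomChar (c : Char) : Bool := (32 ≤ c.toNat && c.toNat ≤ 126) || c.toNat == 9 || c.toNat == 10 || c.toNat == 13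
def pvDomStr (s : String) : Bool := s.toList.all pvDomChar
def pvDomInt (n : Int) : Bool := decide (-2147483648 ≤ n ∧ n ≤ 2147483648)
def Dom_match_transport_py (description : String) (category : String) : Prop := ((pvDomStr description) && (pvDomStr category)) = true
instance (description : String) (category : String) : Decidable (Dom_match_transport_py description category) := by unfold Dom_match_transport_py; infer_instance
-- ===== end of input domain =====

-- B replaces A's nine independent 'k in d' substring searches by a prefix trie of the
-- keywords built once; at each start position one descent down the trie tests all
-- keywords simultaneously (alternative algorithm/data structure, similar cost).


-- ===== PORT A =====
-- the keyword tuple of A, in order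
def pvKeywords : List String := ["TFL", "UBER", "BUS", "TRAIN", "PETROL", "SHELL", "BP ", "PARKING", "TUBE"]

-- 'description or ""' on a str equals description itself when nonempty and "" otherwise,
-- which upper maps to the same value, so it is ported as the identity.
def match_transport_py (description : String) (category : String) : Bool :=
  let d := PySem.Str.upper description
  let c := PySem.Str.upper category
  if c == "TRANSPORT" || c == "FUEL" || c == "PARKING" then true
  else
    -- 'for k in (...): if k in d: return true' / 'return false'
    pvKeywords.any (fun k => PySem.Str.isIn k d)

-- ===== PORT B =====
-- Python's nested-dict trie (with "" as terminal-marker key) is ported as a mutual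
-- inductive: a node is a terminal flag (the "" key) plus an association list of children.
mutual
inductive PvTrie where
  | mk : Bool → PvChildren → PvTrie
  deriving DecidableEq
inductive PvChildren where
  | nil : PvChildren
  | cons : Char → PvTrie → PvChildren → PvChildren
  deriving DecidableEq
end

def pvEmptyTrie : PvTrie := PvTrie.mk false PvChildren.nil

-- node.get(ch)
def pvFindChild : PvChildren → Char → Option PvTrie
  | PvChildren.nil, _ => none
  | PvChildren.cons c' t rest, c => if c' == c then some t else pvFindChild rest c

-- node.setdefault(ch, {}) then recurse: insert walks k, fetching the child (or a fresh
-- empty node) and writing the updated child back at the same key (pvSetChild), exactly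
-- the functional reading of Python's in-place dict mutation along the path.
def pvSetChild : PvChildren → Char → PvTrie → PvChildren
  | PvChildren.nil, c, t => PvChildren.cons c t PvChildren.nil
  | PvChildren.cons c' t' rest, c, t =>
      if c' == c then PvChildren.cons c' t rest
      else PvChildren.cons c' t' (pvSetChild rest c t)

def pvInsert : PvTrie → List Char → PvTrie
  | PvTrie.mk _ ch, [] => PvTrie.mk true ch
  | PvTrie.mk term ch, c :: k =>
      PvTrie.mk term (pvSetChild ch c (pvInsert ((pvFindChild ch c).getD pvEmptyTrie) k))

-- _build_trie(): root = {}; for k in _KEYWORDS: insert k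
def pvBuildTrie : PvTrie := pvKeywords.foldl (fun t k => pvInsert t k.toList) pvEmptyTrie

-- _hit(node, d, j): '"" in node' → terminal flag; then descend on d[j:] (here: the suffix list)
def pvHit : PvTrie → List Char → Bool
  | PvTrie.mk term _, [] => term
  | PvTrie.mk term ch, c :: l =>
      term ||
        (match pvFindChild ch c with
         | none => false
         | some t' => pvHit t' l)

-- 'for i in range(len(d)): if _hit(_TRIE, d, i): return true' — scan over the suffixes of d
def pvScan : PvTrie → List Char → Bool
  | _, [] => false
  | t, c :: rest => pvHit t (c :: rest) || pvScan t rest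

def match_transport_py_alt (description : String) (category : String) : Bool :=
  let c := PySem.Str.upper category
  if c == "TRANSPORT" || c == "FUEL" || c == "PARKING" then true
  else pvScan pvBuildTrie (PySem.Str.upper description).toList

-- ===== PRECONDITION & SPEC =====
def Spec_match_transport_py (description : String) (category : String) (out : Bool) : Prop := out = match_transport_py_alt description category
instance (description : String) (category : String) (out : Bool) : Decidable (Spec_match_transport_py description category out) := by unfold Spec_match_transport_py; infer_instance

-- ===== CLAIM (what is proved, stated in full; the proofs are below) =====
def Claim_equal_match_transport_py : Prop := ∀ (description : String) (category : String), Dom_match_transport_py description category → Spec_match_transport_py description category (match_transport_py description category)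

-- ===== LEMMAS AND PROOFS =====

theorem pvFindChild_set_self (ch : PvChildren) (c : Char) (t : PvTrie) :
    pvFindChild (pvSetChild ch c t) c = some t := by
  match ch with
  | PvChildren.nil => simp [pvSetChild, pvFindChild]
  | PvChildren.cons c' t' rest =>
      by_cases h : c' = c
      · subst h; simp [pvSetChild, pvFindChild]
      · simp [pvSetChild, pvFindChild, h, pvFindChild_set_self rest c t]

theorem pvFindChild_set_ne (ch : PvChildren) (c c₂ : Char) (t : PvTrie) (h : c ≠ c₂) :
    pvFindChild (pvSetChild ch c t) c₂ = pvFindChild ch c₂ := by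
  match ch with
  | PvChildren.nil => simp [pvSetChild, pvFindChild, h]
  | PvChildren.cons c' t' rest =>
      by_cases h' : c' = c
      · subst h'; simp [pvSetChild, pvFindChild, h]
      · simp [pvSetChild, pvFindChild, h', pvFindChild_set_ne rest c c₂ t h]

lemma pvHit_empty (l : List Char) : pvHit pvEmptyTrie l = false := by
  cases l <;> simp [pvHit, pvEmptyTrie, pvFindChild]

lemma pvHit_insert (k : List Char) : ∀ (t : PvTrie) (l : List Char),
    pvHit (pvInsert t k) l = (pvHit t l || decide (k <+: l)) := by
  induction k with
  | nil =>
      intro t l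
      obtain ⟨term, ch⟩ := t
      cases l <;> simp [pvInsert, pvHit]
  | cons c k ih =>
      intro t l
      obtain ⟨term, ch⟩ := t
      cases l with
      | nil => simp [pvInsert, pvHit]
      | cons c₂ l' =>
          by_cases hc : c = c₂
          · subst hc
            simp only [pvInsert, pvHit, pvFindChild_set_self, ih, List.cons_prefix_cons]
            cases hfc : pvFindChild ch c with
            | none => simp [pvHit_empty]
            | some t' => simp [Bool.or_assoc]
          · simp [pvInsert, pvHit, pvFindChild_set_ne ch c c₂ _ hc,
              List.cons_prefix_cons, hc]

lemma pvHit_foldl (ks : List String) : ∀ (t : PvTrie) (l : List Char),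
    pvHit (ks.foldl (fun t k => pvInsert t k.toList) t) l =
      (pvHit t l || ks.any (fun k => decide (k.toList <+: l))) := by
  induction ks with
  | nil => simp
  | cons k ks ih =>
      intro t l
      simp [List.foldl_cons, ih, pvHit_insert, Bool.or_assoc]

lemma pvHit_build (l : List Char) :
    pvHit pvBuildTrie l = pvKeywords.any (fun k => decide (k.toList <+: l)) := by
  simp [pvBuildTrie, pvHit_foldl, pvHit_empty]

lemma pvScan_iff (t : PvTrie) (l : List Char) :
    pvScan t l = true ↔ ∃ i < l.length, pvHit t (l.drop i) = true := by
  induction l with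
  | nil => simp [pvScan]
  | cons c rest ih =>
      simp only [pvScan, Bool.or_eq_true, ih]
      constructor
      · rintro (h | ⟨i, hi, h⟩)
        · exact ⟨0, by simp, h⟩
        · exact ⟨i + 1, by simpa using hi, h⟩
      · rintro ⟨i, hi, h⟩
        cases i with
        | zero => exact Or.inl h
        | succ j => exact Or.inr ⟨j, by simpa using hi, h⟩

-- a nonempty pattern occurs somewhere in d iff it starts at some position i < d.length
lemma isIn_iff_exists_start (k d : List Char) (hk : k ≠ []) :
    PySem.Chars.isIn k d = true ↔ ∃ i < d.length, k <+: d.drop i := by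
  rw [← PySem.Chars.exists_prefix_drop_iff_isIn]
  constructor
  · rintro ⟨j, hj⟩
    by_cases hjl : j < d.length
    · exact ⟨j, hjl, hj⟩
    · exfalso
      have : d.drop j = [] := List.drop_eq_nil_of_le (by omega)
      rw [this] at hj
      exact hk (List.prefix_nil.mp hj)
  · rintro ⟨i, _, hi⟩; exact ⟨i, hi⟩

-- the nine-search loop of A equals B's trie scan of d
lemma any_isIn_eq_scan (d : List Char) :
    pvKeywords.any (fun k => PySem.Chars.isIn k.toList d) = pvScan pvBuildTrie d := by
  rw [Bool.eq_iff_iff, pvScan_iff]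
  constructor
  · rintro h
    simp only [List.any_eq_true] at h
    obtain ⟨k, hk, hin⟩ := h
    have hk' : k.toList ≠ [] := by fin_cases hk <;> decide
    obtain ⟨i, hil, hpre⟩ := (isIn_iff_exists_start k.toList d hk').mp hin
    refine ⟨i, hil, ?_⟩
    rw [pvHit_build]
    simp only [List.any_eq_true, decide_eq_true_eq]
    exact ⟨k, hk, hpre⟩
  · rintro ⟨i, hil, h⟩
    rw [pvHit_build] at h
    simp only [List.any_eq_true, decide_eq_true_eq] at h ⊢
    obtain ⟨k, hk, hpre⟩ := h
    have hk' : k.toList ≠ [] := by fin_cases hk <;> decide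
    exact ⟨k, hk, (isIn_iff_exists_start k.toList d hk').mpr ⟨i, hil, hpre⟩⟩

-- ===== VERDICT (by name: the statement is the Claim_ definition above) =====
theorem match_transport_py_spec : Claim_equal_match_transport_py := by
  intro description category _
  unfold Spec_match_transport_py match_transport_py match_transport_py_alt
  simp only []
  split_ifs with h
  · rfl
  · have := any_isIn_eq_scan (PySem.Str.upper description).toList
    simpa [PySem.Str.isIn] using this
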